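-- pv_equiv track=rewrite | github.com/lbliii/patitas | src/patitas/parsing/blocks/list/nested.py | _is_sibling_marker
-- ===== SOURCE A (Python) =====
-- def _is_sibling_marker(
--     content: str,
--     content_indent: int,
--     expected_indent: int,
--     ordered: bool,
--     marker_char: str,
-- ) -> bool:
--     """Check if content is a sibling list marker at the expected indent."""
--     if content_indent != expected_indent:
--         return False
--
--     if not content:
--         return False
--
--     first_char = content[0]
--
--     if not ordered:
--         return (
--             first_char in "-*+"
--             and first_char == marker_char
--             and len(content) > 1
--             and content[1] in " \t"
--         )
--
--     if first_char.isdigit():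
--         pos = 0
--         while pos < len(content) and content[pos].isdigit():
--             pos += 1
--         return (
--             pos < len(content)
--             and content[pos] == marker_char
--             and pos + 1 < len(content)
--             and content[pos + 1] in " \t"
--         )
--
--     return False
-- ===== SOURCE B (Python) =====
-- def _is_sibling_marker(
--     content: str,
--     content_indent: int,
--     expected_indent: int,
--     ordered: bool,
--     marker_char: str,
-- ) -> bool:
--     """Check if content is a sibling list marker at the expected indent.
--
--     Instead of scanning the digit run forward, locate the marker itself with
--     str.find and validate the whole prefix before it with str.isdigit.
--     Only a single non-digit marker character can ever match (any prefix char
--     equal to the marker would have to be a digit), so the find result is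
--     exactly the boundary A's scan reaches.
--     """
--     if content_indent != expected_indent:
--         return False
--     if len(marker_char) != 1 or marker_char.isdigit():
--         return False
--     if not ordered:
--         return (
--             marker_char in "-*+"
--             and content.startswith(marker_char)
--             and content[1:2] in (" ", "\t")
--         )
--     i = content.find(marker_char)
--     return i >= 1 and content[:i].isdigit() and content[i + 1:i + 2] in (" ", "\t")
-- ===== Notes on version B (the rewrite author's own statement) =====
-- stated objective: alternative
-- what changed: For ordered markers B does not scan the digit run at all: it locates the marker character itself with str.find and validates the entire prefix before it wholesale with str.isdigit (correct because a matching marker is a single non-digit character, so its first occurrence is exactly the digit-run boundary A's while-loop reaches); the single-non-digit-marker fact becomes an explicit up-front guard and the unordered case uses startswith plus slice membership.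
import Mathlib
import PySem

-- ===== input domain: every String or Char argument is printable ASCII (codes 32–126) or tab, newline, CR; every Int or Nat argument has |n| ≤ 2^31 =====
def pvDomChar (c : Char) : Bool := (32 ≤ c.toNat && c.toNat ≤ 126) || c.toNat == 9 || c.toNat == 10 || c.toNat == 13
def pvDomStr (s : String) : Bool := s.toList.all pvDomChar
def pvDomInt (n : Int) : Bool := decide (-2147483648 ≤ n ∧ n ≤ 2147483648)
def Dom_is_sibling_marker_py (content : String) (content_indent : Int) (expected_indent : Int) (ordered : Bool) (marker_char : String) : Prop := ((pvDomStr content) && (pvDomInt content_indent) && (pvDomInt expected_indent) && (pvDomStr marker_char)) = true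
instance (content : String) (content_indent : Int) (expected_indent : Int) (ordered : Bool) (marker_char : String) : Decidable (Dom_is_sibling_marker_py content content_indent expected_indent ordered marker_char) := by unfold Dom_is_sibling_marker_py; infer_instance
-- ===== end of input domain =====

-- B never scans the digit run: it locates the marker character with str.find and validates the
-- whole prefix before it with str.isdigit (objective: alternative); same return value everywhere.

-- ===== PORT A =====
-- the while loop 'while pos < len(content) and content[pos].isdigit(): pos += 1',
-- scanning the remaining suffix while pos counts the digits consumed
def pvAScan : List Char → Nat → Nat
  | [], pos => pos
  | c :: rest, pos => if PySem.Chars.isdigit c then pvAScan rest (pos + 1) else pos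

-- indexing content[i] appears only behind an 'i < len(content)' guard in A, so it is
-- ported with PySem.List.pyGetD (the default is never reached); single-char 'in'
-- membership is PySem.Chars.isIn, '==' against marker_char compares one-char strings
def is_sibling_marker_py (content : String) (content_indent : Int) (expected_indent : Int) (ordered : Bool) (marker_char : String) : Bool :=
  if content_indent ≠ expected_indent then false
  else
    match content.toList with
    | [] => false        -- 'if not content: return False'
    | first_char :: _ =>
      if !ordered then
        -- first_char in "-*+" and first_char == marker_char and len(content) > 1 and content[1] in " \t"
        PySem.Chars.isIn [first_char] "-*+".toList
          && (marker_char.toList == [first_char])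
          && decide (1 < content.toList.length)
          && PySem.Chars.isIn [PySem.List.pyGetD content.toList 1 ' '] " \t".toList
      else if PySem.Chars.isdigit first_char then
        let pos := pvAScan content.toList 0
        -- pos < len(content) and content[pos] == marker_char and pos+1 < len(content) and content[pos+1] in " \t"
        decide (pos < content.toList.length)
          && (marker_char.toList == [PySem.List.pyGetD content.toList (pos : Int) ' '])
          && decide (pos + 1 < content.toList.length)
          && PySem.Chars.isIn [PySem.List.pyGetD content.toList ((pos : Int) + 1) ' '] " \t".toList
      else false

-- ===== PORT B =====
-- len(marker_char) != 1 or marker_char.isdigit()  → False; then for ordered markers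
-- i = content.find(marker_char) and the prefix content[:i] is validated with str.isdigit;
-- slices content[1:2] / content[i+1:i+2] are PySem.List.slice, 'in (" ", "\t")' two equalities
def is_sibling_marker_py_alt (content : String) (content_indent : Int) (expected_indent : Int) (ordered : Bool) (marker_char : String) : Bool :=
  if content_indent ≠ expected_indent then false
  else if decide (marker_char.toList.length ≠ 1) || PySem.Chars.strIsdigit marker_char.toList then false
  else if !ordered then
    PySem.Chars.isIn marker_char.toList "-*+".toList
      && PySem.Chars.startswith content.toList marker_char.toList
      && (PySem.List.slice content.toList (some 1) (some 2) == [' ']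
          || PySem.List.slice content.toList (some 1) (some 2) == ['\t'])
  else
    let i := PySem.Chars.find content.toList marker_char.toList
    decide (1 ≤ i)
      && PySem.Chars.strIsdigit (PySem.List.slice content.toList none (some i))
      && (PySem.List.slice content.toList (some (i + 1)) (some (i + 2)) == [' ']
          || PySem.List.slice content.toList (some (i + 1)) (some (i + 2)) == ['\t'])

-- ===== PRECONDITION & SPEC =====
def Spec_is_sibling_marker_py (content : String) (content_indent : Int) (expected_indent : Int) (ordered : Bool) (marker_char : String) (out : Bool) : Prop := out = is_sibling_marker_py_alt content content_indent expected_indent ordered marker_char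
instance (content : String) (content_indent : Int) (expected_indent : Int) (ordered : Bool) (marker_char : String) (out : Bool) : Decidable (Spec_is_sibling_marker_py content content_indent expected_indent ordered marker_char out) := by unfold Spec_is_sibling_marker_py; infer_instance

-- ===== CLAIM (what is proved, stated in full; the proofs are below) =====
def Claim_equal_is_sibling_marker_py : Prop := ∀ (content : String) (content_indent : Int) (expected_indent : Int) (ordered : Bool) (marker_char : String), Dom_is_sibling_marker_py content content_indent expected_indent ordered marker_char → Spec_is_sibling_marker_py content content_indent expected_indent ordered marker_char (is_sibling_marker_py content content_indent expected_indent ordered marker_char)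

-- ===== LEMMAS AND PROOFS =====

theorem pv_isIn_singleton (c : Char) (s : List Char) : PySem.Chars.isIn [c] s = s.contains c := by
  rcases h : s.contains c with _ | _
  · rw [Bool.eq_false_iff]
    intro hin
    rw [PySem.Chars.isIn_iff_infix] at hin
    have : c ∈ s := hin.mem (by simp)
    simp [List.contains_eq_mem, this] at h
  · rw [PySem.Chars.isIn_iff_infix]
    simp only [List.contains_eq_mem, decide_eq_true_iff] at h
    obtain ⟨u, v, rfl⟩ := List.append_of_mem h
    exact ⟨u, v, by simp⟩

theorem pv_digit_mem (c : Char) (h : PySem.Chars.isdigit c = true) :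
    c ∈ ['0','1','2','3','4','5','6','7','8','9'] := by
  unfold PySem.Chars.isdigit at h
  rw [Bool.and_eq_true, decide_eq_true_iff, decide_eq_true_iff] at h
  have h1 : (48 : Nat) ≤ c.toNat := Fin.mk_le_mk.mp h.1
  have h2 : c.toNat ≤ 57 := Fin.mk_le_mk.mp h.2
  have hc : Char.ofNat c.toNat = c := Char.ofNat_toNat c
  have : c.toNat = 48 ∨ c.toNat = 49 ∨ c.toNat = 50 ∨ c.toNat = 51 ∨ c.toNat = 52 ∨
      c.toNat = 53 ∨ c.toNat = 54 ∨ c.toNat = 55 ∨ c.toNat = 56 ∨ c.toNat = 57 := by omega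
  rcases this with h|h|h|h|h|h|h|h|h|h <;> rw [h] at hc <;> rw [← hc] <;> decide

theorem pvAScan_eq (l : List Char) (k : Nat) :
    pvAScan l k = k + (l.takeWhile PySem.Chars.isdigit).length := by
  induction l generalizing k with
  | nil => simp [pvAScan]
  | cons c rest ih =>
    unfold pvAScan
    rcases h : PySem.Chars.isdigit c with _ | _
    · simp [h]
    · simp [h, ih]
      omega

theorem pv_slice12 (u : List Char) (a : Nat) :
    PySem.List.slice u (some ((a : Int) + 1)) (some ((a : Int) + 2)) = (u.drop (a + 1)).take 1 := by
  have h1 : ((a : Int) + 1) = (((a + 1 : Nat) : Int)) := by push_cast; ring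
  have h2 : ((a : Int) + 2) = (((a + 2 : Nat) : Int)) := by push_cast; ring
  rw [h1, h2]
  have := PySem.List.slice_natCast (xs := u) (a := a + 1) (b := a + 2)
  simpa [Nat.add_sub_cancel] using this

-- B's "x[i+1:i+2] in (' ', '\t')" test agrees with A's guarded index-and-membership test
theorem pv_ws_eq (u : List Char) :
    ((u.take 1 == [' ']) || (u.take 1 == ['\t']))
      = (decide (0 < u.length) && PySem.Chars.isIn [u.getD 0 ' '] " \t".toList) := by
  have hws : " \t".toList = [' ', '\t'] := rfl
  rcases u with _ | ⟨c, r⟩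
  · simp
  · simp only [List.take_succ_cons, List.take_zero, List.getD_cons_zero, List.length_cons]
    rw [pv_isIn_singleton, hws]
    simp only [Nat.zero_lt_succ, decide_true, Bool.true_and]
    rcases hc : ([' ', '\t'].contains c) with _ | _ <;>
      simp_all [List.contains_eq_mem]

theorem pvPrefixSingleton (c : Char) (u : List Char) : [c] <+: u ↔ u.head? = some c := by
  cases u <;> simp [List.cons_prefix_cons, eq_comm]

-- inside the digit run every character is a digit
theorem pvRunDigit (l : List Char) (j : Nat)
    (hj : j < (l.takeWhile PySem.Chars.isdigit).length) :
    PySem.Chars.isdigit (l[j]'(lt_of_lt_of_le hj (List.takeWhile_prefix _).length_le)) = true := by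
  have hpre := List.takeWhile_prefix (l := l) (p := PySem.Chars.isdigit)
  have hg := hpre.getElem hj
  have hmem : l[j]'(lt_of_lt_of_le hj (List.takeWhile_prefix _).length_le)
      ∈ l.takeWhile PySem.Chars.isdigit := hg ▸ List.getElem_mem hj
  exact List.mem_takeWhile_imp hmem

-- the character just past the digit run is not a digit
theorem pvRunBoundary (p : Char → Bool) : ∀ (l : List Char) (h : (l.takeWhile p).length < l.length),
    p (l[(l.takeWhile p).length]'h) = false := by
  intro l
  induction l with
  | nil => intro h; simp at h
  | cons a t ih =>
    intro h
    by_cases hp : p a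
    · simp only [List.takeWhile_cons, hp, if_true, List.length_cons] at h ⊢
      simpa using ih (by simpa using h)
    · simp [hp]

-- an all-digit prefix of length k cannot outrun the digit run
theorem pvRunGe (p : Char → Bool) : ∀ (l : List Char) (k : Nat) (hk : k ≤ l.length),
    (∀ j (hj : j < k), p (l[j]'(lt_of_lt_of_le hj hk)) = true) → k ≤ (l.takeWhile p).length := by
  intro l
  induction l with
  | nil => intro k hk _; simpa using hk
  | cons a t ih =>
    intro k hk hall
    cases k with
    | zero => simp
    | succ k =>
      have ha : p a = true := hall 0 (Nat.succ_pos _)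
      simp only [List.takeWhile_cons, ha, if_true, List.length_cons]
      have := ih k (by simpa using hk) (fun j hj => hall (j+1) (by omega))
      omega

-- find of a singleton needle, given the position of its first occurrence
theorem pvFindEq (l : List Char) (c : Char) (pos : Nat) (hlt : pos < l.length)
    (hat : l[pos] = c) (hbefore : ∀ j (hj : j < pos), l[j]'(lt_trans hj hlt) ≠ c) :
    PySem.Chars.find l [c] = (pos : Int) := by
  have hocc : [c] <+: l.drop pos := by
    rw [pvPrefixSingleton, List.head?_drop]
    simp [List.getElem?_eq_getElem hlt, hat]
  have hinf : [c] <:+: l := (hocc).isInfix.trans (List.drop_suffix pos l).isInfix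
  have hnn : 0 ≤ PySem.Chars.find l [c] := (PySem.Chars.find_nonneg_iff l [c]).mpr hinf
  obtain ⟨hpre, hmin⟩ := PySem.Chars.find_spec hnn
  set f := (PySem.Chars.find l [c]).toNat with hf
  have hfe : PySem.Chars.find l [c] = (f : Int) := by omega
  rw [hfe]
  congr 1
  rcases lt_trichotomy f pos with h | h | h
  · exfalso
    rw [pvPrefixSingleton, List.head?_drop] at hpre
    have hfl : f < l.length := lt_trans h hlt
    rw [List.getElem?_eq_getElem hfl] at hpre
    exact hbefore f h (by simpa using hpre)
  · exact h
  · exact absurd hocc (hmin pos h)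

-- when find is non-negative it points at an occurrence of c
theorem pvFindAt (l : List Char) (c : Char) (hnn : 0 ≤ PySem.Chars.find l [c]) :
    ∃ h : (PySem.Chars.find l [c]).toNat < l.length, l[(PySem.Chars.find l [c]).toNat] = c := by
  obtain ⟨hpre, _⟩ := PySem.Chars.find_spec hnn
  rw [pvPrefixSingleton, List.head?_drop] at hpre
  rcases h : l[(PySem.Chars.find l [c]).toNat]? with _ | x
  · rw [h] at hpre; cases hpre
  · rw [h] at hpre
    obtain ⟨hl, hx⟩ := List.getElem?_eq_some_iff.mp h
    exact ⟨hl, by simp_all⟩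

theorem is_sibling_marker_py_eq (content : String) (content_indent : Int) (expected_indent : Int) (ordered : Bool) (marker_char : String) :
    is_sibling_marker_py content content_indent expected_indent ordered marker_char
      = is_sibling_marker_py_alt content content_indent expected_indent ordered marker_char := by
  unfold is_sibling_marker_py is_sibling_marker_py_alt
  by_cases hie : content_indent ≠ expected_indent
  · rw [if_pos hie, if_pos hie]
  · rw [if_neg hie, if_neg hie]
    by_cases hg : (decide (marker_char.toList.length ≠ 1) || PySem.Chars.strIsdigit marker_char.toList) = true
    · -- B is stopped by its marker guard: marker not a single char, or a digit; A is false too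
      rw [if_pos hg]
      rcases hl : content.toList with _ | ⟨first, t⟩
      · simp
      · rcases hm : marker_char.toList with _ | ⟨c, mt⟩
        · rcases ordered with _ | _
          · simp
          · simp only [Bool.not_true, Bool.false_eq_true, if_false]
            split_ifs with hd
            · simp
            · rfl
        · rcases mt with _ | ⟨c2, mt2⟩
          · -- marker = [c] with c a digit (the length-1 guard cannot have fired)
            have hcd : PySem.Chars.isdigit c = true := by
              rw [hm] at hg
              simpa [PySem.Chars.strIsdigit] using hg
            rcases ordered with _ | _
            · -- unordered: a digit is not in "-*+"
              simp only [Bool.not_false, if_true]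
              by_cases hfc : first = c
              · subst hfc
                have hii : PySem.Chars.isIn [first] ['-', '*', '+'] = false := by
                  rw [pv_isIn_singleton]
                  have := pv_digit_mem first hcd
                  fin_cases this <;> decide
                simp [hii]
              · have : (([c] : List Char) == [first]) = false := by
                  exact beq_eq_false_iff_ne.mpr (by simp; exact fun h => hfc h.symm)
                simp [this]
            · simp only [Bool.not_true, Bool.false_eq_true, if_false]
              split_ifs with hd
              · -- the char at the run boundary is not a digit, so it is not c
                set l := first :: t with hlt
                set P := pvAScan l 0 with hP
                have hPrun : P = (l.takeWhile PySem.Chars.isdigit).length := by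
                  simpa using pvAScan_eq l 0
                by_cases hPl : P < l.length
                · have hb : PySem.Chars.isdigit (l[P]'hPl) = false := by
                    simp only [hPrun]
                    exact pvRunBoundary _ l (hPrun ▸ hPl)
                  have hgd : PySem.List.pyGetD l (P : Int) ' ' = l[P]'hPl := by
                    rw [PySem.List.pyGetD_natCast]
                    simp [List.getD_eq_getElem?_getD, List.getElem?_eq_getElem hPl]
                  have hne : (([c] : List Char) == [PySem.List.pyGetD l (P : Int) ' ']) = false := by
                    rw [hgd]
                    simp only [beq_eq_false_iff_ne, ne_eq, List.cons.injEq, and_true]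
                    intro h
                    rw [← h] at hb
                    rw [hcd] at hb
                    cases hb
                  rw [hne]
                  simp
                · have : decide (P < l.length) = false := by simpa using hPl
                  simp [this]
              · rfl
          · -- marker has ≥ 2 chars: A's single-char comparisons are all false
            rcases ordered with _ | _
            · simp
            · simp only [Bool.not_true, Bool.false_eq_true, if_false]
              split_ifs with hd
              · simp
              · rfl
    · -- marker is a single non-digit char c
      rw [if_neg hg]
      have hm1 : marker_char.toList.length = 1 := by
        by_contra h
        exact hg (by rw [decide_eq_true h, Bool.true_or])
      obtain ⟨c, hm⟩ : ∃ c, marker_char.toList = [c] := by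
        rcases h : marker_char.toList with _ | ⟨c, mt⟩
        · rw [h] at hm1; simp at hm1
        · rcases mt with _ | _
          · exact ⟨c, rfl⟩
          · rw [h] at hm1; simp at hm1
      have hg2 : PySem.Chars.strIsdigit marker_char.toList = false := by
        rcases h : PySem.Chars.strIsdigit marker_char.toList with _ | _
        · rfl
        · exact absurd (by rw [h, Bool.or_true]) hg
      have hc : PySem.Chars.isdigit c = false := by
        rw [hm] at hg2
        simpa [PySem.Chars.strIsdigit] using hg2
      rcases hl : content.toList with _ | ⟨first, t⟩
      · -- empty content: A false; B's startswith / find both fail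
        rcases ordered with _ | _
        · have hsw : PySem.Chars.startswith ([] : List Char) marker_char.toList = false := by
            rw [Bool.eq_false_iff]
            intro h
            have h2 := (PySem.Chars.startswith_iff ([] : List Char) marker_char.toList).mp h
            have h3 := h2.length_le
            rw [hm1] at h3
            simp at h3
          simp [hsw]
        · have hfind : PySem.Chars.find ([] : List Char) marker_char.toList < 1 := by
            have h2 := PySem.Chars.find_le_length ([] : List Char) marker_char.toList
            simpa using lt_of_le_of_lt h2 (by norm_num)
          have h3 : decide (1 ≤ PySem.Chars.find ([] : List Char) marker_char.toList) = false := by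
            simpa using hfind
          simp [h3]
      · rcases ordered with _ | _
        · -- unordered
          simp only [Bool.not_false, if_true]
          rw [hm]
          by_cases hfc : first = c
          · subst hfc
            have hsw : PySem.Chars.startswith (first :: t) [first] = true := by
              rw [PySem.Chars.startswith_iff]
              exact ⟨t, rfl⟩
            have hsl : PySem.List.slice (first :: t) (some 1) (some 2) = t.take 1 := by
              simpa using pv_slice12 (first :: t) 0
            rw [hsw, hsl, pv_ws_eq]
            have hg1' : PySem.List.pyGetD (first :: t) 1 ' ' = t.getD 0 ' ' := by
              have h1 : (1 : Int) = ((1 : Nat) : Int) := rfl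
              rw [h1, PySem.List.pyGetD_natCast]
              simp
            have hl1 : decide (1 < (first :: t).length) = decide (0 < t.length) := by simp
            rw [hg1', hl1]
            simp [Bool.and_assoc]
          · have e1 : (([c] : List Char) == [first]) = false := by
              simp only [beq_eq_false_iff_ne, ne_eq, List.cons.injEq, and_true]
              exact fun h => hfc h.symm
            have hswf : PySem.Chars.startswith (first :: t) [c] = false := by
              rw [Bool.eq_false_iff]
              intro h
              have h2 := (PySem.Chars.startswith_iff (first :: t) [c]).mp h
              rw [List.cons_prefix_cons] at h2
              exact hfc h2.1.symm
            rw [e1, hswf]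
            simp
        · -- ordered
          simp only [Bool.not_true, Bool.false_eq_true, if_false]
          rw [hm]
          set P := pvAScan (first :: t) 0 with hPdef
          have hPrun : P = ((first :: t).takeWhile PySem.Chars.isdigit).length := by
            simpa using pvAScan_eq (first :: t) 0
          split_ifs with hd
          · -- first char is a digit, so the run is nonempty
            have hP1 : 1 ≤ P := by
              rw [hPrun]
              simp [hd]
            by_cases hX : ∃ h : P < (first :: t).length, (first :: t)[P] = c
            · obtain ⟨hPl, hat⟩ := hX
              have hbefore : ∀ j (hj : j < P), (first :: t)[j]'(lt_trans hj hPl) ≠ c := by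
                intro j hj h
                have h2 := pvRunDigit (first :: t) j (by rw [← hPrun]; exact hj)
                rw [h, hc] at h2
                cases h2
              have hfind : PySem.Chars.find (first :: t) [c] = (P : Int) :=
                pvFindEq (first :: t) c P hPl hat hbefore
              have hgd : PySem.List.pyGetD (first :: t) (P : Int) ' ' = c := by
                rw [PySem.List.pyGetD_natCast]
                simp [List.getD_eq_getElem?_getD, List.getElem?_eq_getElem hPl, hat]
              have htake : PySem.List.slice (first :: t) none (some ((P : Nat) : Int)) = (first :: t).take P :=
                PySem.List.slice_to_natCast (first :: t) P
              have hdig : PySem.Chars.strIsdigit ((first :: t).take P) = true := by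
                have hts : (first :: t).take P = (first :: t).takeWhile PySem.Chars.isdigit := by
                  rw [hPrun]
                  exact (List.prefix_iff_eq_take.mp (List.takeWhile_prefix _)).symm
                rw [hts]
                simp only [PySem.Chars.strIsdigit]
                rw [Bool.and_eq_true]
                constructor
                · simp [hd]
                · rw [List.all_eq_true]
                  exact fun x hx => List.mem_takeWhile_imp hx
              rw [hfind, htake, hdig, hgd]
              have hws : PySem.List.slice (first :: t) (some ((P : Int) + 1)) (some ((P : Int) + 2))
                  = ((first :: t).drop (P + 1)).take 1 := pv_slice12 (first :: t) P
              rw [hws, pv_ws_eq]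
              have hgd1 : PySem.List.pyGetD (first :: t) ((P : Int) + 1) ' ' = ((first :: t).drop (P + 1)).getD 0 ' ' := by
                have h1 : ((P : Int) + 1) = (((P + 1 : Nat)) : Int) := by push_cast; ring
                rw [h1, PySem.List.pyGetD_natCast]
                simp [List.getD_eq_getElem?_getD, List.getElem?_drop]
              have hl1 : decide (P + 1 < (first :: t).length) = decide (0 < ((first :: t).drop (P + 1)).length) := by
                rw [decide_eq_decide]
                simp only [List.length_drop, List.length_cons]
                omega
              rw [hgd1, hl1]
              have e1 : (decide (P < (first :: t).length)) = true := by simpa using hPl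
              have e2 : ((c :: ([] : List Char)) == [c]) = true := by simp
              have e3 : decide (1 ≤ ((P : Nat) : Int)) = true :=
                decide_eq_true (by exact_mod_cast hP1)
              rw [e1, e2, e3]
              simp
            · -- A's marker test fails; B's digit-prefix test cannot reach a different boundary
              push_neg at hX
              have hA : (decide (P < (first :: t).length) && (([c] : List Char) == [PySem.List.pyGetD (first :: t) (P : Int) ' '])) = false := by
                by_cases hPl : P < (first :: t).length
                · have hgd : PySem.List.pyGetD (first :: t) (P : Int) ' ' = (first :: t)[P]'hPl := by
                    rw [PySem.List.pyGetD_natCast]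
                    simp [List.getD_eq_getElem?_getD, List.getElem?_eq_getElem hPl]
                  have h2 : (([c] : List Char) == [PySem.List.pyGetD (first :: t) (P : Int) ' ']) = false := by
                    rw [hgd]
                    simp only [beq_eq_false_iff_ne, ne_eq, List.cons.injEq, and_true]
                    exact fun h => hX hPl h.symm
                  rw [h2]
                  simp
                · have h2 : decide (P < (first :: t).length) = false := by simpa using hPl
                  rw [h2]
                  simp
              have hB : (decide (1 ≤ PySem.Chars.find (first :: t) [c])
                  && PySem.Chars.strIsdigit (PySem.List.slice (first :: t) none (some (PySem.Chars.find (first :: t) [c])))) = false := by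
                by_cases h1 : 1 ≤ PySem.Chars.find (first :: t) [c]
                · have hnn : 0 ≤ PySem.Chars.find (first :: t) [c] := by omega
                  obtain ⟨hfl, hfat⟩ := pvFindAt (first :: t) c hnn
                  set f := (PySem.Chars.find (first :: t) [c]).toNat with hfdef
                  have hfe : PySem.Chars.find (first :: t) [c] = (f : Int) := by omega
                  have htake : PySem.List.slice (first :: t) none (some ((f : Nat) : Int)) = (first :: t).take f :=
                    PySem.List.slice_to_natCast (first :: t) f
                  rcases hsd : PySem.Chars.strIsdigit ((first :: t).take f) with _ | _
                  · rw [hfe, htake, hsd]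
                    simp
                  · -- all-digit prefix of length f, and the char at f is c, not a digit ⇒ f = P, contradiction
                    exfalso
                    have hfP : f ≤ P := by
                      rw [hPrun]
                      apply pvRunGe _ (first :: t) f (le_of_lt hfl)
                      intro j hj
                      simp only [PySem.Chars.strIsdigit, Bool.and_eq_true, List.all_eq_true] at hsd
                      have hfl2 : f < t.length + 1 := by
                        simpa using hfl
                      have hjlen : j < ((first :: t).take f).length := by
                        simp only [List.length_take, List.length_cons]
                        omega
                      have h3 := hsd.2 _ (List.getElem_mem hjlen)
                      rwa [List.getElem_take] at h3
                    have hPf : P ≤ f := by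
                      by_contra h
                      push_neg at h
                      have h2 := pvRunDigit (first :: t) f (by rw [← hPrun]; exact h)
                      rw [hfat, hc] at h2
                      cases h2
                    have hPl : P < (first :: t).length := by omega
                    exact hX hPl (by simp only [show P = f by omega]; exact hfat)
                · have h2 : decide (1 ≤ PySem.Chars.find (first :: t) [c]) = false := by simpa using h1
                  rw [h2]
                  simp
              rw [hA, hB]
              simp
          · -- first char not a digit: A false; B's digit prefix would have to start with it
            have hB : (decide (1 ≤ PySem.Chars.find (first :: t) [c])
                && PySem.Chars.strIsdigit (PySem.List.slice (first :: t) none (some (PySem.Chars.find (first :: t) [c])))) = false := by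
              by_cases h1 : 1 ≤ PySem.Chars.find (first :: t) [c]
              · have hnn : 0 ≤ PySem.Chars.find (first :: t) [c] := by omega
                set f := (PySem.Chars.find (first :: t) [c]).toNat with hfdef
                have hf1 : 1 ≤ f := by omega
                have hfe : PySem.Chars.find (first :: t) [c] = (f : Int) := by omega
                have htake : PySem.List.slice (first :: t) none (some ((f : Nat) : Int)) = (first :: t).take f :=
                  PySem.List.slice_to_natCast (first :: t) f
                have hsd : PySem.Chars.strIsdigit ((first :: t).take f) = false := by
                  rw [Bool.eq_false_iff]
                  intro h
                  simp only [PySem.Chars.strIsdigit, Bool.and_eq_true, List.all_eq_true] at h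
                  have hmem : first ∈ (first :: t).take f := by
                    rcases f with _ | f
                    · omega
                    · simp
                  have h2 := h.2 _ hmem
                  exact hd h2
                rw [hfe, htake, hsd]
                simp
              · have h2 : decide (1 ≤ PySem.Chars.find (first :: t) [c]) = false := by simpa using h1
                rw [h2]
                simp
            rw [hB]
            simp

-- ===== VERDICT (by name: the statement is the Claim_ definition above) =====
theorem is_sibling_marker_py_spec : Claim_equal_is_sibling_marker_py := by
  intro content ci ei ordered mc _
  unfold Spec_is_sibling_marker_py
  exact is_sibling_marker_py_eq content ci ei ordered mc
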